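-- pv_equiv track=rewrite | github.com/asifmahbubnaeem/updated_pdfEditor | backend/routes/extract_tables_from_pdf.py | autofix
-- ===== SOURCE A (Python) =====
-- def autofix(table):
--     max_cols = max(len(row) for row in table if row)  # detect max columns
--     fixed_table = []
--     for row in table:
--         if not row:
--             continue
--         tmp_row = [item if item is not None else '' for item in row]
--         fixed_row = tmp_row + [""] * (max_cols - len(tmp_row))
--         fixed_table.append(fixed_row)
--     return fixed_table
-- ===== SOURCE B (Python) =====
-- def autofix(table):
--     rows = [r for r in table if r]
--     width = max(len(r) for r in rows)
--     # build the padded table column by column, then transpose back by index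
--     cols = [[('' if r[i] is None else r[i]) if i < len(r) else '' for r in rows]
--             for i in range(width)]
--     return [[col[j] for col in cols] for j in range(len(rows))]
-- ===== Notes on version B (the rewrite author's own statement) =====
-- stated objective: alternative
-- what changed: B traverses the data column-wise: it builds one list per column index (normalizing None and padding per cell) and then transposes back by row index, instead of A's row-wise accumulator loop that appends replicate-padding to each row.
import Mathlib
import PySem

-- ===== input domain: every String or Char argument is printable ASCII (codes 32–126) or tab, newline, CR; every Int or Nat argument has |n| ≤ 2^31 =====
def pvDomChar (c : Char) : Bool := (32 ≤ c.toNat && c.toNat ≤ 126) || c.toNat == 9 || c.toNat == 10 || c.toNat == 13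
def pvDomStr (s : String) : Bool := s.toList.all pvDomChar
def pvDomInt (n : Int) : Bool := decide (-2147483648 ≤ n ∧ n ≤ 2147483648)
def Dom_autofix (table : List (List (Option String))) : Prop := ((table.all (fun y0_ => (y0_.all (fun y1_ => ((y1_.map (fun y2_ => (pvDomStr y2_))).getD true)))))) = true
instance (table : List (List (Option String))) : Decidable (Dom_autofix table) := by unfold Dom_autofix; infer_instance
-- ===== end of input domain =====

-- B builds the padded table COLUMN-wise (one list per column index, normalizing and padding
-- per cell) and transposes back by row index, instead of A's row-wise pad-and-append loop;
-- an alternative traversal of the same cost.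

-- ===== PORT A =====
-- max(len(row) for row in table if row); the Python max raises ValueError on an empty
-- sequence, excluded by Pre_; the port folds max over the same lengths.
def autofix (table : List (List (Option String))) : List (List String) :=
  let maxCols := ((table.filter (fun r => !r.isEmpty)).map List.length).foldl max 0
  table.foldl
    (fun acc row =>
      if row.isEmpty then acc
      else
        let tmpRow := row.map (fun item => item.getD "")
        let fixedRow := tmpRow ++ List.replicate (maxCols - tmpRow.length) ""
        acc ++ [fixedRow])
    []

-- ===== PORT B =====
-- r[i] and col[j] in Source B are only evaluated at in-range non-negative indices
-- (i < len(r) guard; each col has length len(rows)), so getD is exact there.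
def autofix_alt (table : List (List (Option String))) : List (List String) :=
  let rows := table.filter (fun r => !r.isEmpty)
  let width := (rows.map List.length).foldl max 0
  let cols := (List.range width).map
    (fun i => rows.map (fun r => if i < r.length then (r.getD i none).getD "" else ""))
  (List.range rows.length).map (fun j => cols.map (fun col => col.getD j ""))

-- ===== PRECONDITION & SPEC =====
-- Pre_ excludes exactly the tables with no non-empty row, where Python A (and B) raise
-- ValueError from max() on an empty sequence.
def Pre_autofix (table : List (List (Option String))) : Prop := ∃ r ∈ table, r ≠ []
instance (table : List (List (Option String))) : Decidable (Pre_autofix table) := by unfold Pre_autofix; infer_instance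
def pvWitness_autofix : List (List (Option String)) := [[some "a", none], [some "b", some "c", some "d"], []]

def Spec_autofix (table : List (List (Option String))) (out : List (List String)) : Prop := out = autofix_alt table
instance (table : List (List (Option String))) (out : List (List String)) : Decidable (Spec_autofix table out) := by unfold Spec_autofix; infer_instance

-- ===== CLAIM (what is proved, stated in full; the proofs are below) =====
def Claim_equal_autofix : Prop := ∀ (table : List (List (Option String))), Dom_autofix table → Pre_autofix table → Spec_autofix table (autofix table)

-- ===== LEMMAS AND PROOFS =====

-- A's accumulator fold over table equals mapping the pad over the filtered rows
theorem foldl_pad (table : List (List (Option String))) (M : Nat) (acc : List (List String)) :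
    table.foldl
      (fun acc row =>
        if row.isEmpty then acc
        else
          let tmpRow := row.map (fun item => item.getD "")
          acc ++ [tmpRow ++ List.replicate (M - tmpRow.length) ""])
      acc
    = acc ++ (table.filter (fun r => !r.isEmpty)).map
        (fun row =>
          let tmpRow := row.map (fun item => item.getD "")
          tmpRow ++ List.replicate (M - tmpRow.length) "") := by
  induction table generalizing acc with
  | nil => simp
  | cons r rs ih =>
    by_cases hr : r.isEmpty <;>
      simp only [List.foldl_cons, List.filter_cons, hr, Bool.not_true, Bool.not_false, ih] <;> simp

-- B's per-cell expression equals indexing into the normalized row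
theorem cell_eq_getD (r : List (Option String)) (i : Nat) :
    (if i < r.length then (r.getD i none).getD "" else "")
      = (r.map (fun item => item.getD "")).getD i "" := by
  by_cases h : i < r.length
  · simp [h, List.getD]
  · simp [h, List.getD]

-- padding with replicate equals building each cell by index
theorem pad_eq_range (l : List String) (M : Nat) (h : l.length ≤ M) :
    l ++ List.replicate (M - l.length) "" = (List.range M).map (fun i => l.getD i "") := by
  apply List.ext_getElem
  · simp; omega
  · intro i h1 h2
    simp only [List.getElem_map, List.getElem_range]
    by_cases hi : i < l.length
    · rw [List.getElem_append_left hi]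
      simp [List.getD, List.getElem?_eq_getElem hi]
    · rw [List.getElem_append_right (by omega)]
      simp [List.getD, List.getElem?_eq_none (by omega : l.length ≤ i)]

theorem autofix_eq_alt (table : List (List (Option String))) : autofix table = autofix_alt table := by
  unfold autofix autofix_alt
  rw [foldl_pad]
  simp only [List.nil_append]
  set rows := table.filter (fun r => !r.isEmpty) with hrows
  set W := (rows.map List.length).foldl max 0 with hW
  apply List.ext_getElem
  · simp
  · intro j h1 h2
    simp only [List.getElem_map, List.getElem_range, List.map_map]
    have hj : j < rows.length := by simpa using h1
    have hlen : (rows[j].map (fun item => item.getD "")).length ≤ W := by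
      rw [List.length_map]
      exact (PySem.List.le_foldl_max _ _).2 _ (List.mem_map_of_mem (rows.getElem_mem hj))
    rw [pad_eq_range _ _ hlen]
    apply List.map_congr_left
    intro i _
    rw [← cell_eq_getD]
    simp [List.getD, List.getElem?_eq_getElem hj]

-- ===== VERDICT (by name: the statement is the Claim_ definition above) =====
theorem autofix_spec : Claim_equal_autofix := by
  intro table _ _
  unfold Spec_autofix
  exact autofix_eq_alt table
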